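-- pv_equiv track=rewrite | github.com/yassineayadi/ctci-python | src/chapter05/p04.py | get_last_non_trailing_0
-- ===== SOURCE A (Python) =====
-- def get_last_non_trailing_0(val: int):
--     binary = f"{val:b}"
--     idx = len(binary)
--     first_1 = 0
--     while idx:
--         current = int(binary[idx - 1])
--         if current == 1 and first_1 == 0:
--             first_1 = idx
--         if current == 0 and idx < first_1:
--             return len(binary) - idx
--         idx = idx - 1
-- ===== SOURCE B (Python) =====
-- def get_last_non_trailing_0(val: int):
--     m = abs(val)
--     if m == 0:
--         return None
--     pos = 0
--     while m % 2 == 0:   # strip trailing zeros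
--         m //= 2
--         pos += 1
--     while m % 2 == 1:   # strip the block of trailing ones
--         m //= 2
--         pos += 1
--     return pos if m else None
-- ===== Notes on version B (the rewrite author's own statement) =====
-- stated objective: alternative
-- what changed: B never builds the binary string: it works on abs(val) directly with two staged divide-by-2 loops (strip trailing zeros, then strip the block of trailing ones) and returns the bit position reached, instead of A's flag-carrying right-to-left scan of f"{val:b}".
import Mathlib
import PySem

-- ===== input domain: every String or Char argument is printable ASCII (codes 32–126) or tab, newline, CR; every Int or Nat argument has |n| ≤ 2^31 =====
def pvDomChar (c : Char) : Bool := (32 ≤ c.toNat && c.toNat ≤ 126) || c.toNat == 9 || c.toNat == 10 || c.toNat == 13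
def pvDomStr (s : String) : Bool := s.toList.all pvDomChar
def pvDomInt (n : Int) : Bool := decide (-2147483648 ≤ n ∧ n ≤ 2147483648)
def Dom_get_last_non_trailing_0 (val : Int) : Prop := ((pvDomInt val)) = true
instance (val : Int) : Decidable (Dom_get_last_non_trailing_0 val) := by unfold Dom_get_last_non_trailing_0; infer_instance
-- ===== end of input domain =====

-- B drops the binary string entirely: it strips trailing zeros and then the block of trailing
-- ones from abs(val) with two staged divide-by-2 loops (objective: alternative decomposition).

-- ===== PORT A =====

-- f"{n:b}" for n > 0 (binary digits, most significant first)
def natBin : Nat → List Char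
  | 0 => []
  | n + 1 => natBin ((n + 1) / 2) ++ [if (n + 1) % 2 = 1 then '1' else '0']
  decreasing_by omega

-- f"{val:b}" as a list of characters (leading '-' for negative values)
def pyBin (val : Int) : List Char :=
  if val < 0 then '-' :: natBin (-val).toNat
  else if val = 0 then ['0'] else natBin val.toNat

-- int(c) on a one-character string; none exactly where Python raises ValueError (e.g. on '-')
def digitVal? (c : Char) : Option Int := PySem.Int.ofStr? (String.ofList [c])

-- A's while loop: fuel is idx, state is first_1; `none` is both "fell off the loop" (Python
-- returns None) and "int() raised" (those inputs are excluded by Pre_).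
def loopA (L : List Char) : Nat → Int → Option Int
  | 0, _ => none
  | idx + 1, first1 =>
    match digitVal? (L.getD idx ' ') with
    | none => none
    | some cur =>
      let first1' := if cur = 1 ∧ first1 = 0 then ((idx : Int) + 1) else first1
      if cur = 0 ∧ ((idx : Int) + 1) < first1' then some ((L.length : Int) - ((idx : Int) + 1))
      else loopA L idx first1'

def get_last_non_trailing_0 (val : Int) : Option Int :=
  let binary := pyBin val
  loopA binary binary.length 0

-- ===== PORT B =====

-- B's first while loop (strip trailing zeros); the `m ≠ 0` conjunct is only a totality
-- guard: Source B calls it with m ≠ 0, and then every recursive argument stays ≠ 0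
def loopZeros (m pos : Nat) : Nat × Nat :=
  if m % 2 = 0 ∧ m ≠ 0 then loopZeros (m / 2) (pos + 1) else (m, pos)
  termination_by m
  decreasing_by omega

-- B's second while loop (strip the block of trailing ones)
def loopOnes (m pos : Nat) : Nat × Nat :=
  if m % 2 = 1 then loopOnes (m / 2) (pos + 1) else (m, pos)
  termination_by m
  decreasing_by omega

def get_last_non_trailing_0_alt (val : Int) : Option Int :=
  let m := val.natAbs
  if m = 0 then none
  else
    let z := loopZeros m 0
    let o := loopOnes z.1 z.2
    if o.1 ≠ 0 then some (o.2 : Int) else none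

-- ===== PRECONDITION & SPEC =====
-- Pre_ excludes exactly the inputs on which the Python A raises ValueError (int('-')): the
-- negative values whose magnitude is a block of binary ones followed by trailing zeros (no zero
-- digit above the lowest set bit).
def Pre_get_last_non_trailing_0 (val : Int) : Prop :=
  0 ≤ val ∨
    (((-val).toNat ||| ((-val).toNat - 1)) &&& (((-val).toNat ||| ((-val).toNat - 1)) + 1)) ≠ 0
instance (val : Int) : Decidable (Pre_get_last_non_trailing_0 val) := by
  unfold Pre_get_last_non_trailing_0; infer_instance

def pvWitness_get_last_non_trailing_0 : Int := (-5)

def Spec_get_last_non_trailing_0 (val : Int) (out : Option Int) : Prop := out = get_last_non_trailing_0_alt val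
instance (val : Int) (out : Option Int) : Decidable (Spec_get_last_non_trailing_0 val out) := by unfold Spec_get_last_non_trailing_0; infer_instance

-- ===== CLAIM (what is proved, stated in full; the proofs are below) =====
def Claim_equal_get_last_non_trailing_0 : Prop := ∀ (val : Int), Dom_get_last_non_trailing_0 val → Pre_get_last_non_trailing_0 val → Spec_get_last_non_trailing_0 val (get_last_non_trailing_0 val)


-- ===== LEMMAS AND PROOFS =====

lemma digit0 : digitVal? '0' = some 0 := by decide
lemma digit1 : digitVal? '1' = some 1 := by decide
lemma digitDash : digitVal? '-' = none := by decide

-- one-step unfoldings of A's loop, by the digit read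
lemma loopA_step0 (L : List Char) (idx : Nat) (first1 : Int) (hc : L.getD idx ' ' = '0') :
    loopA L (idx + 1) first1 =
      if ((idx : Int) + 1) < first1 then some ((L.length : Int) - ((idx : Int) + 1))
      else loopA L idx first1 := by
  rw [loopA, hc, digit0]; norm_num

lemma loopA_step1 (L : List Char) (idx : Nat) (first1 : Int) (hc : L.getD idx ' ' = '1') :
    loopA L (idx + 1) first1 =
      loopA L idx (if first1 = 0 then ((idx : Int) + 1) else first1) := by
  rw [loopA, hc, digit1]; norm_num

lemma loopA_stepDash (L : List Char) (idx : Nat) (first1 : Int) (hc : L.getD idx ' ' = '-') :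
    loopA L (idx + 1) first1 = none := by
  rw [loopA, hc, digitDash]

-- proof-side recursive views of B's two phases, with A's "seen a 1 yet" split baked in
def g1 (r pos : Nat) : Option Int :=
  if r = 0 then none
  else if r % 2 = 1 then g1 (r / 2) (pos + 1)
  else some (pos : Int)
  termination_by r
  decreasing_by omega

def g0 (r pos : Nat) : Option Int :=
  if r = 0 then none
  else if r % 2 = 0 then g0 (r / 2) (pos + 1)
  else g1 (r / 2) (pos + 1)
  termination_by r
  decreasing_by omega

lemma natBin_ne_nil (n : Nat) (h : 0 < n) : natBin n ≠ [] := by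
  cases n with
  | zero => omega
  | succ k => rw [natBin]; simp

lemma getD_append_last (L : List Char) (c : Char) : (L ++ [c]).getD L.length ' ' = c := by
  rw [List.getD_eq_getElem?_getD, List.getElem?_append_right (le_refl _)]
  simp

lemma getD_append_left (L M : List Char) (i : Nat) (h : i < L.length) :
    (L ++ M).getD i ' ' = L.getD i ' ' := by
  rw [List.getD_eq_getElem?_getD, List.getElem?_append_left h, List.getD_eq_getElem?_getD]

-- the binary string of m > 0 has length len with 2^(len-1) ≤ m < 2^len
lemma natBin_bounds : ∀ n, 0 < n →
    2 ^ ((natBin n).length - 1) ≤ n ∧ n < 2 ^ (natBin n).length := by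
  intro n
  induction n using natBin.induct with
  | case1 => intro h; omega
  | case2 n ih =>
    intro _
    rw [natBin]
    simp only [List.length_append, List.length_cons, List.length_nil, Nat.zero_add,
      Nat.add_sub_cancel]
    by_cases hq : (n + 1) / 2 = 0
    · have hn : n = 0 := by omega
      subst hn
      simp [hq, natBin]
    · obtain ⟨h1, h2⟩ := ih (by omega)
      have hl1 : 1 ≤ (natBin ((n + 1) / 2)).length :=
        List.length_pos_of_ne_nil (natBin_ne_nil ((n + 1) / 2) (by omega))
      have e1 : 2 ^ (natBin ((n + 1) / 2)).length = 2 ^ ((natBin ((n + 1) / 2)).length - 1) * 2 := by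
        conv_lhs => rw [show (natBin ((n + 1) / 2)).length = ((natBin ((n + 1) / 2)).length - 1) + 1 by omega]
        rw [pow_succ]
      have e2 : 2 ^ ((natBin ((n + 1) / 2)).length + 1) = 2 ^ (natBin ((n + 1) / 2)).length * 2 :=
        pow_succ 2 _
      omega

-- the digit at string index k-1 (1 ≤ k ≤ len) is bit (len - k) of n
lemma natBin_char : ∀ n, 0 < n → ∀ k, 1 ≤ k → k ≤ (natBin n).length →
    (natBin n).getD (k - 1) ' ' =
      (if (n / 2 ^ ((natBin n).length - k)) % 2 = 1 then '1' else '0') := by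
  intro n
  induction n using natBin.induct with
  | case1 => intro h; omega
  | case2 n ih =>
    intro _ k hk1 hk2
    rw [natBin] at hk2 ⊢
    simp only [List.length_append, List.length_cons, List.length_nil, Nat.zero_add] at hk2 ⊢
    by_cases hk : k = (natBin ((n + 1) / 2)).length + 1
    · subst hk
      rw [show (natBin ((n + 1) / 2)).length + 1 - 1 = (natBin ((n + 1) / 2)).length by omega,
        getD_append_last, Nat.sub_self, pow_zero, Nat.div_one]
    · have hk2' : k ≤ (natBin ((n + 1) / 2)).length := by omega
      have hq : 0 < (n + 1) / 2 := by
        by_contra hq0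
        have h00 : (n + 1) / 2 = 0 := by omega
        rw [h00] at hk2'
        simp [natBin] at hk2'
        omega
      rw [getD_append_left _ _ _ (by omega), ih hq k hk1 hk2']
      have e : (n + 1) / 2 / 2 ^ ((natBin ((n + 1) / 2)).length - k)
          = (n + 1) / 2 ^ ((natBin ((n + 1) / 2)).length + 1 - k) := by
        rw [Nat.div_div_eq_div_mul, ← pow_succ']
        congr 2
        omega
      rw [e]

-- phase 1 of A (first_1 already set to f > idx): A agrees with g1 on the remaining bits
lemma phaseOne (L : List Char) (base lenm m : Nat)
    (hb : base = 0 ∨ (base = 1 ∧ L.getD 0 ' ' = '-'))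
    (hub : m < 2 ^ lenm) (hlb : 2 ^ (lenm - 1) ≤ m)
    (hN : L.length = base + lenm)
    (hchar : ∀ k, 1 ≤ k → k ≤ lenm →
      L.getD (base + k - 1) ' ' = (if (m / 2 ^ (lenm - k)) % 2 = 1 then '1' else '0')) :
    ∀ k, k ≤ lenm → ∀ f : Int, f ≠ 0 → ((base : Int) + k) < f →
      loopA L (base + k) f = g1 (m / 2 ^ (lenm - k)) (lenm - k) := by
  intro k
  induction k with
  | zero =>
    intro _ f hf _
    have hr : m / 2 ^ (lenm - 0) = 0 := Nat.div_eq_of_lt (by simpa using hub)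
    have hR : g1 (m / 2 ^ (lenm - 0)) (lenm - 0) = none := by rw [hr, g1]; simp
    rw [hR]
    simp only [Nat.add_zero]
    rcases hb with hb | ⟨hb, hdash⟩
    · subst hb; rw [loopA]
    · subst hb; exact loopA_stepDash L 0 f hdash
  | succ k ih =>
    intro hk f hf hfk
    have hr0 : m / 2 ^ (lenm - (k + 1)) ≠ 0 := by
      have hle : 2 ^ (lenm - (k + 1)) ≤ 2 ^ (lenm - 1) := Nat.pow_le_pow_right (by omega) (by omega)
      have := Nat.div_pos (le_trans hle hlb) (Nat.two_pow_pos _)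
      omega
    have hchark := hchar (k + 1) (by omega) hk
    rw [show base + (k + 1) - 1 = base + k by omega] at hchark
    have hdiv : m / 2 ^ (lenm - (k + 1)) / 2 = m / 2 ^ (lenm - k) := by
      rw [Nat.div_div_eq_div_mul, ← pow_succ]
      congr 2
      omega
    rw [show base + (k + 1) = (base + k) + 1 by omega]
    by_cases hbit : (m / 2 ^ (lenm - (k + 1))) % 2 = 1
    · rw [if_pos hbit] at hchark
      rw [loopA_step1 L (base + k) f hchark, if_neg hf,
          ih (by omega) f hf (by push_cast at hfk; omega)]
      conv_rhs => rw [g1]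
      rw [if_neg hr0, if_pos hbit, hdiv]
      congr 1
      omega
    · rw [if_neg hbit] at hchark
      rw [loopA_step0 L (base + k) f hchark,
          if_pos (by push_cast; push_cast at hfk; omega)]
      conv_rhs => rw [g1]
      rw [if_neg hr0, if_neg hbit]
      rw [hN]
      congr 1
      push_cast
      omega

-- phase 0 of A (first_1 = 0): A agrees with g0 on the remaining bits
lemma phaseZero (L : List Char) (base lenm m : Nat)
    (hb : base = 0 ∨ (base = 1 ∧ L.getD 0 ' ' = '-'))
    (hub : m < 2 ^ lenm) (hlb : 2 ^ (lenm - 1) ≤ m)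
    (hN : L.length = base + lenm)
    (hchar : ∀ k, 1 ≤ k → k ≤ lenm →
      L.getD (base + k - 1) ' ' = (if (m / 2 ^ (lenm - k)) % 2 = 1 then '1' else '0')) :
    ∀ k, k ≤ lenm → loopA L (base + k) 0 = g0 (m / 2 ^ (lenm - k)) (lenm - k) := by
  intro k
  induction k with
  | zero =>
    intro _
    have hr : m / 2 ^ (lenm - 0) = 0 := Nat.div_eq_of_lt (by simpa using hub)
    have hR : g0 (m / 2 ^ (lenm - 0)) (lenm - 0) = none := by rw [hr, g0]; simp
    rw [hR]
    simp only [Nat.add_zero]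
    rcases hb with hb | ⟨hb, hdash⟩
    · subst hb; rw [loopA]
    · subst hb; exact loopA_stepDash L 0 0 hdash
  | succ k ih =>
    intro hk
    have hr0 : m / 2 ^ (lenm - (k + 1)) ≠ 0 := by
      have hle : 2 ^ (lenm - (k + 1)) ≤ 2 ^ (lenm - 1) := Nat.pow_le_pow_right (by omega) (by omega)
      have := Nat.div_pos (le_trans hle hlb) (Nat.two_pow_pos _)
      omega
    have hchark := hchar (k + 1) (by omega) hk
    rw [show base + (k + 1) - 1 = base + k by omega] at hchark
    have hdiv : m / 2 ^ (lenm - (k + 1)) / 2 = m / 2 ^ (lenm - k) := by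
      rw [Nat.div_div_eq_div_mul, ← pow_succ]
      congr 2
      omega
    rw [show base + (k + 1) = (base + k) + 1 by omega]
    by_cases hbit : (m / 2 ^ (lenm - (k + 1))) % 2 = 1
    · rw [if_pos hbit] at hchark
      rw [loopA_step1 L (base + k) 0 hchark, if_pos rfl,
          phaseOne L base lenm m hb hub hlb hN hchar k (by omega)
            (((base + k : Nat) : Int) + 1) (by omega) (by omega)]
      conv_rhs => rw [g0]
      rw [if_neg hr0, if_neg (by omega : ¬ (m / 2 ^ (lenm - (k + 1))) % 2 = 0), hdiv]
      congr 1
      omega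
    · rw [if_neg hbit] at hchark
      rw [loopA_step0 L (base + k) 0 hchark, if_neg (by omega), ih (by omega)]
      conv_rhs => rw [g0]
      rw [if_neg hr0, if_pos (by omega : (m / 2 ^ (lenm - (k + 1))) % 2 = 0), hdiv]
      congr 1
      omega

-- g1 is B's second loop followed by the final test
lemma g1_eq_loopOnes : ∀ r pos, g1 r pos =
    (if (loopOnes r pos).1 ≠ 0 then some (((loopOnes r pos).2 : Nat) : Int) else none) := by
  intro r
  induction r using Nat.strong_induction_on with
  | _ r ih =>
    intro pos
    by_cases h0 : r = 0
    · subst h0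
      rw [g1, show loopOnes 0 pos = (0, pos) from by rw [loopOnes]; norm_num]
      norm_num
    · by_cases h1 : r % 2 = 1
      · rw [g1, if_neg h0, if_pos h1,
            show loopOnes r pos = loopOnes (r / 2) (pos + 1) from by rw [loopOnes, if_pos h1]]
        exact ih (r / 2) (by omega) (pos + 1)
      · rw [g1, if_neg h0, if_neg h1,
            show loopOnes r pos = (r, pos) from by rw [loopOnes, if_neg h1]]
        simp [h0]

-- g0 is B's staged pipeline
lemma g0_eq_pipeline : ∀ r pos, g0 r pos =
    (if (loopOnes (loopZeros r pos).1 (loopZeros r pos).2).1 ≠ 0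
     then some (((loopOnes (loopZeros r pos).1 (loopZeros r pos).2).2 : Nat) : Int) else none) := by
  intro r
  induction r using Nat.strong_induction_on with
  | _ r ih =>
    intro pos
    by_cases h0 : r = 0
    · subst h0
      rw [g0, show loopZeros 0 pos = (0, pos) from by rw [loopZeros]; norm_num,
          show loopOnes 0 pos = (0, pos) from by rw [loopOnes]; norm_num]
      norm_num
    · by_cases h2 : r % 2 = 0
      · rw [g0, if_neg h0, if_pos h2,
            show loopZeros r pos = loopZeros (r / 2) (pos + 1) from by
              rw [loopZeros, if_pos ⟨h2, h0⟩]]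
        exact ih (r / 2) (by omega) (pos + 1)
      · rw [g0, if_neg h0, if_neg h2,
            show loopZeros r pos = (r, pos) from by
              rw [loopZeros, if_neg (by tauto : ¬ (r % 2 = 0 ∧ r ≠ 0))],
            show loopOnes r pos = loopOnes (r / 2) (pos + 1) from by
              rw [loopOnes, if_pos (by omega : r % 2 = 1)]]
        exact g1_eq_loopOnes (r / 2) (pos + 1)

-- ===== VERDICT (by name: the statement is the Claim_ definition above) =====
theorem get_last_non_trailing_0_spec : Claim_equal_get_last_non_trailing_0 := by
  intro val _ _
  unfold Spec_get_last_non_trailing_0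
  by_cases h0 : val = 0
  · subst h0; decide
  · have hm : 0 < val.natAbs := Int.natAbs_pos.mpr h0
    obtain ⟨hlb, hub⟩ := natBin_bounds val.natAbs hm
    have hchar := natBin_char val.natAbs hm
    have hBside : get_last_non_trailing_0_alt val =
        (if val.natAbs = 0 then none
         else if (loopOnes (loopZeros val.natAbs 0).1 (loopZeros val.natAbs 0).2).1 ≠ 0
           then some (((loopOnes (loopZeros val.natAbs 0).1 (loopZeros val.natAbs 0).2).2 : Nat) : Int)
           else none) := rfl
    rw [hBside, if_neg (by omega : ¬ val.natAbs = 0), ← g0_eq_pipeline val.natAbs 0]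
    show loopA (pyBin val) (pyBin val).length 0 = g0 val.natAbs 0
    rcases lt_trichotomy val 0 with hneg | hz | hpos
    · have hL : pyBin val = '-' :: natBin val.natAbs := by
        unfold pyBin
        rw [if_pos hneg]
        congr 2
        omega
      have hlen : (pyBin val).length = 1 + (natBin val.natAbs).length := by
        rw [hL]; simp only [List.length_cons]; omega
      have hchar' : ∀ k, 1 ≤ k → k ≤ (natBin val.natAbs).length →
          (pyBin val).getD (1 + k - 1) ' ' =
            (if (val.natAbs / 2 ^ ((natBin val.natAbs).length - k)) % 2 = 1 then '1' else '0') := by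
        intro k hk1 hk2
        rw [hL, show 1 + k - 1 = (k - 1) + 1 by omega, List.getD_cons_succ]
        exact hchar k hk1 hk2
      have hph := phaseZero (pyBin val) 1 (natBin val.natAbs).length val.natAbs
        (Or.inr ⟨rfl, by rw [hL]; simp⟩) hub hlb hlen hchar'
        (natBin val.natAbs).length le_rfl
      simp only [Nat.sub_self, pow_zero, Nat.div_one] at hph
      rw [hlen]
      exact hph
    · exact absurd hz h0
    · have hL : pyBin val = natBin val.natAbs := by
        unfold pyBin
        rw [if_neg (by omega), if_neg h0]
        congr 1
        omega
      have hlen : (pyBin val).length = 0 + (natBin val.natAbs).length := by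
        rw [hL]; omega
      have hchar' : ∀ k, 1 ≤ k → k ≤ (natBin val.natAbs).length →
          (pyBin val).getD (0 + k - 1) ' ' =
            (if (val.natAbs / 2 ^ ((natBin val.natAbs).length - k)) % 2 = 1 then '1' else '0') := by
        intro k hk1 hk2
        rw [hL, show 0 + k - 1 = k - 1 by omega]
        exact hchar k hk1 hk2
      have hph := phaseZero (pyBin val) 0 (natBin val.natAbs).length val.natAbs
        (Or.inl rfl) hub hlb hlen hchar'
        (natBin val.natAbs).length le_rfl
      simp only [Nat.sub_self, pow_zero, Nat.div_one] at hph
      rw [hlen]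
      exact hph
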